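-- pv_equiv track=rewrite | github.com/nayanika2304/DataStructuresPractice | Practise_bit_manipulation/pairwise_swap.py | create_even_mask
-- ===== SOURCE A (Python) =====
-- def create_even_mask(num):
--     bin_representation = bin(num)[2:]
--     bit_length = len(bin_representation)
--     bit_sign = '1'
--     mask = []
--
--     for i in range(bit_length):
--         mask.insert(0, bit_sign)
--         bit_sign = '1' if bit_sign == '0' else '0'
--
--     return int(''.join(mask), 2)
-- ===== SOURCE B (Python) =====
-- def create_even_mask(num):
--     # Same bit length as A: len(bin(num)[2:]) (exact also for 0 and negatives).
--     L = len(bin(num)[2:])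
--     # Closed form for the 0b...0101 pattern of length L: (L+1)//2 ones at even positions.
--     return (4 ** ((L + 1) // 2) - 1) // 3
-- ===== Notes on version B (the rewrite author's own statement) =====
-- stated objective: simpler
-- what changed: Replaces the build-a-char-list-by-front-insertion-then-parse-base-2 loop with a direct arithmetic closed form (a geometric-series formula over the count of set bits) over the same bit length taken from the binary string.
import Mathlib
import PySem

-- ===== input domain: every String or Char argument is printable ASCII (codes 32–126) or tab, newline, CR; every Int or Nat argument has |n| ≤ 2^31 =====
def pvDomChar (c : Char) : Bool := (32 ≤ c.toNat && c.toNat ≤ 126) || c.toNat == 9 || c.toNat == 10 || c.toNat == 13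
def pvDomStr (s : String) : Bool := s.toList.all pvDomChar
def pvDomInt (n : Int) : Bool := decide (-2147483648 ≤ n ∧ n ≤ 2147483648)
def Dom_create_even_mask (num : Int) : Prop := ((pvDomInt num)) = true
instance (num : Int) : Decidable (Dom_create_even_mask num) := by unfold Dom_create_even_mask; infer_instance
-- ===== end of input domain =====

-- B replaces A's front-insertion mask list and base-2 parse with an arithmetic closed form over the same bit length (objective: simpler).
-- ===== PORT A =====
-- the for-loop: each step does mask.insert(0, bit_sign) and flips bit_sign; recursion on the remaining iteration count
def pvMaskLoop : Nat → Char → List Char → List Char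
  | 0, _, mask => mask
  | n + 1, bit_sign, mask =>
      pvMaskLoop n (if bit_sign = '0' then '1' else '0') (bit_sign :: mask)

-- int(''.join(mask), 2): left-to-right base-2 parse; exact here since mask holds only '0'/'1' and is nonempty
def pvParseBin (cs : List Char) : Int :=
  cs.foldl (fun acc c => acc * 2 + (if c = '1' then (1 : Int) else 0)) 0

def create_even_mask (num : Int) : Int :=
  let bin_representation := (PySem.Int.pyBin num).toList.drop 2  -- bin(num)[2:]; drop 2 = slice [2:] (nonneg start)
  let bit_length := bin_representation.length
  pvParseBin (pvMaskLoop bit_length '1' [])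

-- ===== PORT B =====
def create_even_mask_alt (num : Int) : Int :=
  let L := ((PySem.Int.pyBin num).toList.drop 2).length  -- len(bin(num)[2:])
  PySem.Int.floordiv (4 ^ ((L + 1) / 2) - 1) 3

-- ===== PRECONDITION & SPEC =====
def Spec_create_even_mask (num : Int) (out : Int) : Prop := out = create_even_mask_alt num
instance (num : Int) (out : Int) : Decidable (Spec_create_even_mask num out) := by unfold Spec_create_even_mask; infer_instance

-- ===== CLAIM (what is proved, stated in full; the proofs are below) =====
def Claim_equal_create_even_mask : Prop := ∀ (num : Int), Dom_create_even_mask num → Spec_create_even_mask num (create_even_mask num)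

-- ===== LEMMAS AND PROOFS =====

lemma pvMaskLoop_append (n : Nat) (s : Char) (m : List Char) :
    pvMaskLoop n s m = pvMaskLoop n s [] ++ m := by
  induction n generalizing s m with
  | zero => simp [pvMaskLoop]
  | succ k ih =>
      simp only [pvMaskLoop]
      rw [ih, ih (if s = '0' then '1' else '0') [s]]
      simp

lemma pvMaskLoop_two (n : Nat) :
    pvMaskLoop (n + 2) '1' [] = pvMaskLoop n '1' [] ++ ['0', '1'] := by
  have h0 : (if ('1' : Char) = '0' then '1' else '0') = '0' := by decide
  simp only [pvMaskLoop, h0, if_true]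
  rw [pvMaskLoop_append n '1' ['0', '1']]

lemma pvParseBin_append01 (cs : List Char) :
    pvParseBin (cs ++ ['0', '1']) = 4 * pvParseBin cs + 1 := by
  simp [pvParseBin, List.foldl_append]
  ring

lemma pvKey (n : Nat) :
    3 * pvParseBin (pvMaskLoop n '1' []) = 4 ^ ((n + 1) / 2) - 1 := by
  induction n using Nat.twoStepInduction with
  | zero => decide
  | one => decide
  | more k ih _ =>
      rw [pvMaskLoop_two, pvParseBin_append01]
      have h2 : (k + 2 + 1) / 2 = (k + 1) / 2 + 1 := by omega
      rw [h2, pow_succ]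
      nlinarith [ih]

lemma pvFloordiv3 (k : Int) : PySem.Int.floordiv (3 * k) 3 = k := by
  simp [PySem.Int.floordiv]

-- ===== VERDICT (by name: the statement is the Claim_ definition above) =====
theorem create_even_mask_spec : Claim_equal_create_even_mask := by
  intro num _
  unfold Spec_create_even_mask create_even_mask create_even_mask_alt
  show pvParseBin (pvMaskLoop ((PySem.Int.pyBin num).toList.drop 2).length '1' []) =
    PySem.Int.floordiv (4 ^ ((((PySem.Int.pyBin num).toList.drop 2).length + 1) / 2) - 1) 3
  have h := pvKey ((PySem.Int.pyBin num).toList.drop 2).length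
  rw [← h, pvFloordiv3]
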